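-- pv_equiv track=rewrite | github.com/benc2/PokerBot | game_runner.py | partioner
-- ===== SOURCE A (Python) =====
-- def partioner(amount, partition):
--     # divides money in bins according to all-in bets, essentially like tax brackets
--     output = []
--     partition = [0] + partition
--     intervals = [partition[i+1] - partition[i] for i in range(len(partition)-1)]
--     out_of_money = False
--     for i in intervals:
--         if out_of_money:
--             output.append(0)
--             continue
--
--         if amount < i:
--             out_of_money = True
--             output.append(amount)
--         else:
--             output.append(i)
--             amount -= i
--
--     # processing remaining amount of money above highest partition
--     if out_of_money:
--         output.append(0)
--     else:
--         output.append(amount)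
--
--     return output
-- ===== SOURCE B (Python) =====
-- def partioner(amount, partition):
--     # find the first bracket boundary the amount cannot reach, then build the
--     # output in one shot: filled bins, the remainder, and trailing zeros
--     b = [0] + partition
--     k = next((j for j, p in enumerate(partition) if amount < p), None)
--     if k is None:
--         return [b[i + 1] - b[i] for i in range(len(partition))] + [amount - b[-1]]
--     return [b[i + 1] - b[i] for i in range(k)] + [amount - b[k]] + [0] * (len(partition) - k)
-- ===== Notes on version B (the rewrite author's own statement) =====
-- stated objective: simpler
-- what changed: Replaces A's stateful loop with an out_of_money flag and running amount by a single search for the first boundary the amount cannot reach, then assembles the whole output directly as filled bins + remainder + trailing zeros.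
import Mathlib
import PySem

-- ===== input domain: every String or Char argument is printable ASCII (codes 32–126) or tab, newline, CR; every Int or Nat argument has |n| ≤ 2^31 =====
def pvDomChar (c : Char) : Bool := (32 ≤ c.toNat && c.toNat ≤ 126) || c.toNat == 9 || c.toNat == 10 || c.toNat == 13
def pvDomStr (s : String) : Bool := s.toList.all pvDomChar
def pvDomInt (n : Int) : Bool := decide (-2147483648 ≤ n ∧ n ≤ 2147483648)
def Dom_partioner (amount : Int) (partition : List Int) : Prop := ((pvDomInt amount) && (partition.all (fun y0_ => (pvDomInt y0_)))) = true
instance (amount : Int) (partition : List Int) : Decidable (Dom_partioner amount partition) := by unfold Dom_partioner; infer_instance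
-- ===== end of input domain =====

-- B replaces A's stateful out_of_money loop by finding the first unreachable boundary
-- and assembling the output directly (filled bins + remainder + zeros): same cost, simpler decomposition.


-- ===== PORT A =====
-- loop body of A's for-loop over intervals; state = (output, out_of_money, amount)
def pvStepA (s : List Int × Bool × Int) (i : Int) : List Int × Bool × Int :=
  if s.2.1 then (s.1 ++ [0], s.2.1, s.2.2)
  else if s.2.2 < i then (s.1 ++ [s.2.2], true, s.2.2)
  else (s.1 ++ [i], s.2.1, s.2.2 - i)

-- the indices i and i+1 of A's comprehension are always in range, so pyGetD is exact for partition[i]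
def partioner (amount : Int) (partition : List Int) : List Int :=
  let part := 0 :: partition
  let intervals := (PySem.List.pyRange 0 ((part.length : Int) - 1) 1).map
    (fun i => PySem.List.pyGetD part (i + 1) 0 - PySem.List.pyGetD part i 0)
  let s := intervals.foldl pvStepA ([], false, amount)
  if s.2.1 then s.1 ++ [0] else s.1 ++ [s.2.2]

-- ===== PORT B =====
-- indices in B's comprehensions are nonnegative and in range, so List.getD is exact; b[-1] is pyGetD b (-1)
def partioner_alt (amount : Int) (partition : List Int) : List Int :=
  let b := 0 :: partition
  match partition.findIdx? (fun p => decide (amount < p)) with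
  | none =>
      (List.range partition.length).map (fun i => b.getD (i + 1) 0 - b.getD i 0)
        ++ [amount - PySem.List.pyGetD b (-1) 0]
  | some k =>
      (List.range k).map (fun i => b.getD (i + 1) 0 - b.getD i 0)
        ++ [amount - b.getD k 0] ++ List.replicate (partition.length - k) 0

-- ===== PRECONDITION & SPEC =====
def Spec_partioner (amount : Int) (partition : List Int) (out : List Int) : Prop := out = partioner_alt amount partition
instance (amount : Int) (partition : List Int) (out : List Int) : Decidable (Spec_partioner amount partition out) := by unfold Spec_partioner; infer_instance

-- ===== CLAIM (what is proved, stated in full; the proofs are below) =====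
def Claim_equal_partioner : Prop := ∀ (amount : Int) (partition : List Int), Dom_partioner amount partition → Spec_partioner amount partition (partioner amount partition)

-- ===== LEMMAS AND PROOFS =====

-- A's tail: append the leftover amount, or 0 when out of money
def pvFin (s : List Int × Bool × Int) : List Int :=
  if s.2.1 then s.1 ++ [0] else s.1 ++ [s.2.2]

-- common recursive characterisation of both programs: bins for amount a above base boundary c
def pvG (a c : Int) : List Int → List Int
  | [] => [a - c]
  | p :: ps => if a < p then (a - c) :: List.replicate (ps.length + 1) 0
               else (p - c) :: pvG a p ps

theorem pvRangeMap_shift (n : Nat) (c p : Int) (ps : List Int) :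
    (List.range (n + 1)).map (fun i => (c :: p :: ps).getD (i + 1) 0 - (c :: p :: ps).getD i 0)
    = (p - c) :: (List.range n).map (fun i => (p :: ps).getD (i + 1) 0 - (p :: ps).getD i 0) := by
  simp [List.range_succ_eq_map, List.map_map, Function.comp]

-- A's interval list equals the Nat-indexed range map
theorem pvIntervalsA (partition : List Int) :
    (PySem.List.pyRange 0 (((0 :: partition).length : Int) - 1) 1).map
      (fun i => PySem.List.pyGetD (0 :: partition) (i + 1) 0 - PySem.List.pyGetD (0 :: partition) i 0)
    = (List.range partition.length).map
      (fun i => (0 :: partition).getD (i + 1) 0 - (0 :: partition).getD i 0) := by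
  have h : ((0 :: partition).length : Int) - 1 = (partition.length : Int) := by simp
  rw [h, PySem.List.pyRange_zero_nat, List.map_map]
  apply List.map_congr_left
  intro k hk
  have h1 : PySem.List.pyGetD (0 :: partition) ((k : Int) + 1) 0 = partition[k]?.getD 0 := by
    have h2 : ((k : Int) + 1) = ((k + 1 : Nat) : Int) := by push_cast; ring
    rw [h2, PySem.List.pyGetD_natCast]; simp
  simp [Function.comp, h1]

-- once out of money, the rest of A's loop only appends zeros
theorem pvFoldl_true (l : List Int) (out : List Int) (a : Int) :
    l.foldl pvStepA (out, true, a) = (out ++ List.replicate l.length 0, true, a) := by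
  induction l generalizing out with
  | nil => simp
  | cons x xs ih => simp [pvStepA, ih, List.replicate_succ]

-- A's loop + tail over the interval list of (c :: ps), with residual a - c, computes pvG a c ps
theorem pvLemmaA (ps : List Int) (c a : Int) (out : List Int) :
    pvFin (((List.range ps.length).map
      (fun i => (c :: ps).getD (i + 1) 0 - (c :: ps).getD i 0)).foldl pvStepA (out, false, a - c))
    = out ++ pvG a c ps := by
  induction ps generalizing c out with
  | nil => simp [pvFin, pvG]
  | cons p ps ih =>
    rw [List.length_cons, pvRangeMap_shift, List.foldl_cons]
    by_cases h : a < p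
    · have hstep : pvStepA (out, false, a - c) (p - c) = (out ++ [a - c], true, a - c) := by
        simp only [pvStepA]; rw [if_neg (by simp), if_pos (by omega)]
      rw [hstep, pvFoldl_true]
      simp [pvFin, pvG, h, List.replicate_succ']
    · have hstep : pvStepA (out, false, a - c) (p - c) = (out ++ [p - c], false, a - p) := by
        simp only [pvStepA]; rw [if_neg (by simp), if_neg (by omega)]
        simp
      rw [hstep, ih p (out ++ [p - c])]
      simp [pvG, h]

-- B's construction, generalised over the base boundary c, also computes pvG a c ps
theorem pvLemmaB (ps : List Int) (c a : Int) :
    (match ps.findIdx? (fun p => decide (a < p)) with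
     | none =>
        (List.range ps.length).map (fun i => (c :: ps).getD (i + 1) 0 - (c :: ps).getD i 0)
          ++ [a - PySem.List.pyGetD (c :: ps) (-1) 0]
     | some k =>
        (List.range k).map (fun i => (c :: ps).getD (i + 1) 0 - (c :: ps).getD i 0)
          ++ [a - (c :: ps).getD k 0] ++ List.replicate (ps.length - k) 0)
    = pvG a c ps := by
  induction ps generalizing c with
  | nil => simp [pvG, PySem.List.pyGetD, PySem.List.pyGet?_neg_one]
  | cons p ps ih =>
    rw [List.findIdx?_cons]
    by_cases h : a < p
    · simp [h, pvG]
    · simp only [h, decide_false, Bool.false_eq_true, if_false]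
      have ihp := ih p
      cases hf : ps.findIdx? (fun q => decide (a < q)) with
      | none =>
        rw [hf] at ihp
        simp only [Option.map_none, List.length_cons]
        rw [pvRangeMap_shift]
        simp only [pvG, if_neg h]
        rw [← ihp]
        simp [PySem.List.pyGetD, PySem.List.pyGet?_neg_one]
      | some k =>
        rw [hf] at ihp
        simp only [Option.map_some, List.length_cons]
        rw [pvRangeMap_shift]
        simp only [pvG, if_neg h]
        rw [← ihp]
        simp
-- ===== VERDICT (by name: the statement is the Claim_ definition above) =====
theorem partioner_spec : Claim_equal_partioner := by
  intro amount partition _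
  unfold Spec_partioner
  have hA : partioner amount partition
      = pvFin (((PySem.List.pyRange 0 (((0 :: partition).length : Int) - 1) 1).map
          (fun i => PySem.List.pyGetD (0 :: partition) (i + 1) 0 - PySem.List.pyGetD (0 :: partition) i 0)).foldl
          pvStepA ([], false, amount)) := rfl
  rw [hA, pvIntervalsA]
  have hA2 := pvLemmaA partition 0 amount []
  simp only [Int.sub_zero] at hA2
  rw [hA2]
  have hB := pvLemmaB partition 0 amount
  unfold partioner_alt
  rw [hB]
  simp
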